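-- pv_equiv track=rewrite | github.com/JinaneJH/mypy | mypy/stubutil.py | find_unique_signatures
-- ===== SOURCE A (Python) =====
-- def find_unique_signatures(sigs):
--     sig_map = {}
--     for name, sig in sigs:
--         sig_map.setdefault(name, []).append(sig)
--     result = []
--     for name, name_sigs in sig_map.items():
--         if len(set(name_sigs)) == 1:
--             result.append((name, name_sigs[0]))
--     return result
-- ===== SOURCE B (Python) =====
-- def find_unique_signatures(sigs):
--     # One pass: per name keep (first_sig, is_unique) instead of the list of all sigs.
--     info = {}
--     for name, sig in sigs:
--         if name not in info:
--             info[name] = (sig, True)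
--         else:
--             first, uniq = info[name]
--             info[name] = (first, uniq and sig == first)
--     return [(name, first) for name, (first, uniq) in info.items() if uniq]
-- ===== Notes on version B (the rewrite author's own statement) =====
-- stated objective: alternative
-- what changed: Instead of grouping all signatures per name into lists and then counting distinct ones with set(), B keeps a single (first_sig, is_unique) record per name and updates the flag incrementally in one pass, so no per-name list or set is ever built (less memory, same O(n) time).
import Mathlib
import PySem

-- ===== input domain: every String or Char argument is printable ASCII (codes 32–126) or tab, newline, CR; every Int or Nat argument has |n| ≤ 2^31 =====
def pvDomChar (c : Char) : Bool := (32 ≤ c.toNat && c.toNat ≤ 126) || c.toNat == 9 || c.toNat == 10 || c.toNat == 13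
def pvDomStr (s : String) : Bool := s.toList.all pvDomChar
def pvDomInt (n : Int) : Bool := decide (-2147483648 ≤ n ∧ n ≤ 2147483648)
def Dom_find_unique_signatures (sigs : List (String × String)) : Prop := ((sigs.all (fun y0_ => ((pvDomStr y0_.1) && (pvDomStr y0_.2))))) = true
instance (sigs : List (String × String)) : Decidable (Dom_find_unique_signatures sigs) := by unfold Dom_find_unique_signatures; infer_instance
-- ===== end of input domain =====

-- ===== PORT A =====
def find_unique_signatures (sigs : List (String × String)) : List (String × String) :=
  let sig_map := sigs.foldl (fun d p => d.modify p.1 [] (fun l => l ++ [p.2])) PySem.Dict.empty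
  -- name_sigs[0]: each grouped list is nonempty, so the default "" is unreachable
  sig_map.items.foldl
    (fun result p =>
      if PySem.Set.len (PySem.Set.ofList p.2) == 1 then
        result ++ [(p.1, PySem.List.pyGetD p.2 0 "")]
      else result) []

-- ===== PORT B =====
-- B replaces A's per-name signature lists + set() count by a single (first_sig, is_unique)
-- record per name, updated in one pass (alternative decomposition; same O(n) time).
def find_unique_signatures_alt (sigs : List (String × String)) : List (String × String) :=
  let info := sigs.foldl
    (fun d p =>
      match d.get? p.1 with
      | none => d.insert p.1 (p.2, true)
      | some (first, uniq) => d.insert p.1 (first, uniq && (p.2 == first)))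
    PySem.Dict.empty
  (info.items.filter (fun p => p.2.2)).map (fun p => (p.1, p.2.1))

-- ===== PRECONDITION & SPEC =====
def Spec_find_unique_signatures (sigs : List (String × String)) (out : List (String × String)) : Prop := out = find_unique_signatures_alt sigs
instance (sigs : List (String × String)) (out : List (String × String)) : Decidable (Spec_find_unique_signatures sigs out) := by unfold Spec_find_unique_signatures; infer_instance

-- ===== CLAIM (what is proved, stated in full; the proofs are below) =====
def Claim_equal_find_unique_signatures : Prop := ∀ (sigs : List (String × String)), Dom_find_unique_signatures sigs → Spec_find_unique_signatures sigs (find_unique_signatures sigs)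

-- ===== LEMMAS AND PROOFS =====

-- B's loop body, named for the proofs (definitionally the lambda in find_unique_signatures_alt)
def pvStepB (d : PySem.Dict String (String × Bool)) (p : String × String) :
    PySem.Dict String (String × Bool) :=
  match d.get? p.1 with
  | none => d.insert p.1 (p.2, true)
  | some (first, uniq) => d.insert p.1 (first, uniq && (p.2 == first))

-- the value pvStepB stores at key p.1
def pvValB (d : PySem.Dict String (String × Bool)) (p : String × String) : String × Bool :=
  match d.get? p.1 with
  | none => (p.2, true)
  | some (first, uniq) => (first, uniq && (p.2 == first))

lemma pvStepB_eq : pvStepB = fun d p => d.insert p.1 (pvValB d p) := by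
  funext d p
  unfold pvStepB pvValB
  cases h : d.get? p.1 with
  | none => rfl
  | some v => obtain ⟨f, u⟩ := v; rfl

-- abstract replay of B's per-key updates
def pvComb : Option (String × Bool) → List String → Option (String × Bool)
  | o, [] => o
  | none, s :: rest => pvComb (some (s, true)) rest
  | some (f, u), s :: rest => pvComb (some (f, u && (s == f))) rest

lemma pvComb_some (rest : List String) (f : String) (u : Bool) :
    pvComb (some (f, u)) rest = some (f, u && rest.all (· == f)) := by
  induction rest generalizing u with
  | nil => simp [pvComb]
  | cons s t ih => simp [pvComb, ih, Bool.and_assoc]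

lemma get_foldl_stepB (sigs : List (String × String)) (d : PySem.Dict String (String × Bool))
    (k : String) :
    (sigs.foldl pvStepB d).get? k
      = pvComb (d.get? k) ((sigs.filter (fun p => p.1 == k)).map (·.2)) := by
  induction sigs generalizing d with
  | nil => rfl
  | cons p rest ih =>
    obtain ⟨n, s⟩ := p
    by_cases h : n = k
    · subst h
      simp only [List.foldl_cons, List.filter_cons, List.map_cons, beq_self_eq_true, if_pos]
      rw [ih]
      cases hd : d.get? n with
      | none =>
        simp only [pvStepB, hd, PySem.Dict.get?_insert_self, pvComb]
      | some v =>
        obtain ⟨f, u⟩ := v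
        simp only [pvStepB, hd, PySem.Dict.get?_insert_self, pvComb]
    · have hne : ((n, s).1 == k) = false := by simp [h]
      simp only [List.foldl_cons, List.filter_cons, hne, Bool.false_eq_true, if_false]
      rw [ih]
      have hget : (pvStepB d (n, s)).get? k = d.get? k := by
        unfold pvStepB
        cases hd : d.get? n with
        | none => exact PySem.Dict.get?_insert_of_ne _ _ (fun hk => h hk.symm)
        | some v => obtain ⟨f, u⟩ := v; exact PySem.Dict.get?_insert_of_ne _ _ (fun hk => h hk.symm)
      rw [hget]

-- per-key facts: the grouped sig list is nonempty, and B's dict holds (head, all-equal flag)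
lemma per_key (sigs : List (String × String)) (k : String) (hk : k ∈ sigs.map (·.1)) :
    ∃ s rest, (sigs.filter (fun p => p.1 == k)).map (·.2) = s :: rest ∧
      (sigs.foldl pvStepB PySem.Dict.empty).get? k = some (s, rest.all (· == s)) := by
  obtain ⟨p, hp, hpk⟩ := List.mem_map.mp hk
  have hne : (sigs.filter (fun p => p.1 == k)).map (·.2) ≠ [] := by
    intro hnil
    have : p ∈ sigs.filter (fun p => p.1 == k) := List.mem_filter.mpr ⟨hp, by simp [hpk]⟩
    simp [List.map_eq_nil_iff.mp hnil] at this
  cases hg : (sigs.filter (fun p => p.1 == k)).map (·.2) with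
  | nil => exact absurd hg hne
  | cons s rest =>
    refine ⟨s, rest, rfl, ?_⟩
    rw [get_foldl_stepB, hg]
    simp only [PySem.Dict.get?_empty, pvComb, pvComb_some, Bool.true_and]

-- len(set(s::rest)) == 1  ↔  every later element equals the first
lemma set_len_one (s : String) (rest : List String) :
    ((PySem.Set.len (PySem.Set.ofList (s :: rest)) == 1) = true) ↔ rest.all (· == s) = true := by
  rw [PySem.Set.ofList_cons]
  have hlen : PySem.Set.len (s :: PySem.Set.discard (PySem.Set.ofList rest) s)
      = ((PySem.Set.discard (PySem.Set.ofList rest) s).length : Int) + 1 := by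
    simp [PySem.Set.len]
  rw [hlen]
  constructor
  · intro h
    have hz : (PySem.Set.discard (PySem.Set.ofList rest) s).length = 0 := by
      have := beq_iff_eq.mp h
      omega
    have hnil : PySem.Set.discard (PySem.Set.ofList rest) s = [] := List.length_eq_zero_iff.mp hz
    simp only [List.all_eq_true]
    intro x hx
    by_contra hxs
    have : x ∈ PySem.Set.discard (PySem.Set.ofList rest) s :=
      (PySem.Set.mem_discard _ _ _).mpr ⟨(PySem.Set.mem_ofList _ _).mpr hx, by simpa using hxs⟩
    simp [hnil] at this
  · intro h
    have hnil : PySem.Set.discard (PySem.Set.ofList rest) s = [] := by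
      rw [List.eq_nil_iff_forall_not_mem]
      intro x hx
      obtain ⟨hx1, hx2⟩ := (PySem.Set.mem_discard _ _ _).mp hx
      exact hx2 (by
        have := List.all_eq_true.mp h x ((PySem.Set.mem_ofList _ _).mp hx1)
        exact beq_iff_eq.mp this)
    simp [hnil]

theorem main_eq (sigs : List (String × String)) :
    find_unique_signatures sigs = find_unique_signatures_alt sigs := by
  unfold find_unique_signatures find_unique_signatures_alt
  change (sigs.foldl (fun d p => d.modify p.1 [] (fun l => l ++ [p.2])) PySem.Dict.empty).items.foldl
      _ [] = ((sigs.foldl pvStepB PySem.Dict.empty).items.filter _).map _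
  rw [pvStepB_eq]
  have hKA : (sigs.foldl (fun d p => d.modify p.1 [] (fun l => l ++ [p.2]))
      PySem.Dict.empty).keys = PySem.Set.ofList (sigs.map (·.1)) := by
    rw [PySem.Dict.keys_foldl_modify_key]
    simp [PySem.Set.update_nil_left]
  have hNA : (sigs.foldl (fun d p => d.modify p.1 [] (fun l => l ++ [p.2]))
      PySem.Dict.empty).keys.Nodup := by
    apply PySem.Dict.nodup_keys_foldl_modify_key
    simp
  have hKB : (sigs.foldl (fun d p => d.insert p.1 (pvValB d p)) PySem.Dict.empty).keys
      = PySem.Set.ofList (sigs.map (·.1)) := by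
    rw [PySem.Dict.keys_foldl_insert_key]
    simp [PySem.Set.update_nil_left]
  have hNB : (sigs.foldl (fun d p => d.insert p.1 (pvValB d p)) PySem.Dict.empty).keys.Nodup := by
    apply PySem.Dict.nodup_keys_foldl_insert_key
    simp
  rw [PySem.List.foldl_append_if, List.nil_append,
    PySem.Dict.items_eq_map_keys _ hNA [], PySem.Dict.items_eq_map_keys _ hNB ("", false),
    hKA, hKB, List.filter_map, List.filter_map, List.map_map, List.map_map]
  have hfilter : (PySem.Set.ofList (sigs.map (·.1))).filter
        ((fun p => PySem.Set.len (PySem.Set.ofList p.2) == 1) ∘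
          fun k => (k, (sigs.foldl (fun d p => d.modify p.1 [] (fun l => l ++ [p.2]))
            PySem.Dict.empty).getD k []))
      = (PySem.Set.ofList (sigs.map (·.1))).filter
        ((fun p => p.2.2) ∘
          fun k => (k, (sigs.foldl (fun d p => d.insert p.1 (pvValB d p))
            PySem.Dict.empty).getD k ("", false))) := by
    apply List.filter_congr
    intro k hkmem
    have hk : k ∈ sigs.map (·.1) := (PySem.Set.mem_ofList _ _).mp hkmem
    obtain ⟨s, rest, hg, hget⟩ := per_key sigs k hk
    have hA : (sigs.foldl (fun d p => d.modify p.1 [] (fun l => l ++ [p.2]))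
        PySem.Dict.empty).getD k [] = s :: rest := by
      rw [PySem.Dict.getD_foldl_modify_append, PySem.Dict.getD_empty, List.nil_append, hg]
    have hB : (sigs.foldl (fun d p => d.insert p.1 (pvValB d p))
        PySem.Dict.empty).getD k ("", false) = (s, rest.all (· == s)) := by
      rw [← pvStepB_eq] at *
      exact PySem.Dict.getD_of_get?_eq_some _ _ hget
    simp only [Function.comp_apply, hA, hB]
    rcases hall : rest.all (· == s) with _ | _
    · have := (not_iff_not.mpr (set_len_one s rest)).mpr (by simp [hall])
      simpa using this
    · exact (set_len_one s rest).mpr hall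
  rw [hfilter]
  apply List.map_congr_left
  intro k hkf
  have hk : k ∈ sigs.map (·.1) := (PySem.Set.mem_ofList _ _).mp (List.mem_of_mem_filter hkf)
  obtain ⟨s, rest, hg, hget⟩ := per_key sigs k hk
  have hA : (sigs.foldl (fun d p => d.modify p.1 [] (fun l => l ++ [p.2]))
      PySem.Dict.empty).getD k [] = s :: rest := by
    rw [PySem.Dict.getD_foldl_modify_append, PySem.Dict.getD_empty, List.nil_append, hg]
  have hB : (sigs.foldl (fun d p => d.insert p.1 (pvValB d p))
      PySem.Dict.empty).getD k ("", false) = (s, rest.all (· == s)) := by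
    rw [← pvStepB_eq] at *
    exact PySem.Dict.getD_of_get?_eq_some _ _ hget
  simp only [Function.comp_apply, hA, hB]
  simp [PySem.List.pyGetD, PySem.List.pyGet?, PySem.List.pyIdx?]

-- ===== VERDICT (by name: the statement is the Claim_ definition above) =====
theorem find_unique_signatures_spec : Claim_equal_find_unique_signatures := by
  intro sigs _
  unfold Spec_find_unique_signatures
  exact main_eq sigs
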